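-- pv_equiv track=rewrite | github.com/someshsingh22/autods | src/mcts_utils.py | get_msgs_from_latest_query
-- ===== SOURCE A (Python) =====
-- def get_msgs_from_latest_query(messages):
--     # Find last user_proxy message by iterating in reverse
--     start_idx = None
--     for i, message in enumerate(reversed(messages)):
--         if message.get("name") == "user_proxy":
--             start_idx = len(messages) - 1 - i
--             break
--     if start_idx is None:
--         return []
--     node_messages = messages[start_idx:]
--     return node_messages
-- ===== SOURCE B (Python) =====
-- def get_msgs_from_latest_query(messages):
--     # Single forward pass that builds the suffix directly: every user_proxy
--     # message restarts the accumulator, later messages are appended to it.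
--     node_messages = None
--     for message in messages:
--         if message.get("name") == "user_proxy":
--             node_messages = [message]
--         elif node_messages is not None:
--             node_messages.append(message)
--     return node_messages if node_messages is not None else []
-- ===== Notes on version B (the rewrite author's own statement) =====
-- stated objective: alternative
-- what changed: Instead of A's reverse scan with break that computes an index and slices, B makes one forward pass that builds the result list itself: each user_proxy message resets the accumulator to [message] and subsequent messages are appended, so no index or slice is computed at all.
import Mathlib
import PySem

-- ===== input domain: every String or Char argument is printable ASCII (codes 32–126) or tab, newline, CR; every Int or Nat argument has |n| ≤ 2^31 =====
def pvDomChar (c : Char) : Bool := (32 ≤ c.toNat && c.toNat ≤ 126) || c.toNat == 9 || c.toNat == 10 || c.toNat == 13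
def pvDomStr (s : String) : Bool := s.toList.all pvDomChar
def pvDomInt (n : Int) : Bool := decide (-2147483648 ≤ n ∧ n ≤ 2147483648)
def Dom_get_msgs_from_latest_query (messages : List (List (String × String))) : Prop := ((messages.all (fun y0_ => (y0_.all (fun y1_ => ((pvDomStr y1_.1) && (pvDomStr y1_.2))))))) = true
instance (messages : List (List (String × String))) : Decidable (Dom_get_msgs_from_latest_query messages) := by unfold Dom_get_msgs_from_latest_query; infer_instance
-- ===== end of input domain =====

-- B replaces A's reverse-scan/index/slice by a forward pass building the suffix list directly (alternative decomposition, same cost).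


-- ===== PORT A =====
-- reverse-enumerate loop with break: first user_proxy in the reversed list yields len-1-i
def pvALoop (len : Nat) : List (List (String × String)) → Int → Option Int
  | [], _ => none
  | m :: rest, i =>
      if PySem.Dict.get? (PySem.Dict.mk m) "name" = some "user_proxy" then some ((len : Int) - 1 - i)
      else pvALoop len rest (i + 1)

def get_msgs_from_latest_query (messages : List (List (String × String))) : List (List (String × String)) :=
  match pvALoop messages.length messages.reverse 0 with
  | none => []
  | some idx => PySem.List.slice messages (some idx) none

-- ===== PORT B =====
-- forward pass accumulating the suffix: user_proxy resets acc to [m], later messages are appended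
def pvBCollect : List (List (String × String)) → Option (List (List (String × String))) → Option (List (List (String × String)))
  | [], acc => acc
  | m :: rest, acc =>
      pvBCollect rest
        (if PySem.Dict.get? (PySem.Dict.mk m) "name" = some "user_proxy" then some [m]
         else acc.map (fun l => l ++ [m]))

def get_msgs_from_latest_query_alt (messages : List (List (String × String))) : List (List (String × String)) :=
  (pvBCollect messages none).getD []

-- ===== PRECONDITION & SPEC =====
def Spec_get_msgs_from_latest_query (messages : List (List (String × String))) (out : List (List (String × String))) : Prop := out = get_msgs_from_latest_query_alt messages
instance (messages : List (List (String × String))) (out : List (List (String × String))) : Decidable (Spec_get_msgs_from_latest_query messages out) := by unfold Spec_get_msgs_from_latest_query; infer_instance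

-- ===== CLAIM (what is proved, stated in full; the proofs are below) =====
def Claim_equal_get_msgs_from_latest_query : Prop := ∀ (messages : List (List (String × String))), Dom_get_msgs_from_latest_query messages → Spec_get_msgs_from_latest_query messages (get_msgs_from_latest_query messages)

-- ===== LEMMAS AND PROOFS =====

def pvP (m : List (String × String)) : Bool := PySem.Dict.get? (PySem.Dict.mk m) "name" == some "user_proxy"

theorem pvALoop_eq_findIdx? (len : Nat) (rev : List (List (String × String))) (i : Int) :
    pvALoop len rev i = (rev.findIdx? pvP).map (fun k => (len : Int) - 1 - (i + k)) := by
  induction rev generalizing i with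
  | nil => simp [pvALoop]
  | cons m rest ih =>
      by_cases h : PySem.Dict.get? (PySem.Dict.mk m) "name" = some "user_proxy"
      · simp [pvALoop, h, pvP, List.findIdx?_cons]
      · simp [pvALoop, h, pvP, List.findIdx?_cons, ih, Function.comp]
        rcases rest.findIdx? pvP with _ | k
        · rfl
        · simp
          omega

theorem pvBCollect_eq (xs : List (List (String × String))) (acc : Option (List (List (String × String)))) :
    pvBCollect xs acc =
      match xs.reverse.findIdx? pvP with
      | none => acc.map (fun l => l ++ xs)
      | some k => some (xs.drop (xs.length - 1 - k)) := by
  induction xs generalizing acc with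
  | nil => simp [pvBCollect]
  | cons m rest ih =>
      rw [pvBCollect, ih]
      have happ : (m :: rest).reverse = rest.reverse ++ [m] := by simp
      rw [happ, List.findIdx?_append]
      rcases hfr : rest.reverse.findIdx? pvP with _ | k
      · simp only [Option.none_or]
        by_cases h : PySem.Dict.get? (PySem.Dict.mk m) "name" = some "user_proxy"
        · simp [pvP, h, List.findIdx?_cons]
        · simp only [pvP, h, List.findIdx?_cons]
          simp [h]
          rcases acc with _ | l <;> simp
      · have hk : k < rest.length := by
          have := List.findIdx?_eq_some_iff_findIdx_eq.mp hfr
          simpa using this.1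
        have h2 : rest.length - k = (rest.length - 1 - k) + 1 := by omega
        simp only [Option.some_or]
        simp [h2]

theorem findIdx?_lt_length {α : Type} (xs : List α) (p : α → Bool) (k : Nat)
    (h : xs.findIdx? p = some k) : k < xs.length := by
  have := List.findIdx?_eq_some_iff_findIdx_eq.mp h
  exact this.1

-- ===== VERDICT (by name: the statement is the Claim_ definition above) =====
theorem get_msgs_from_latest_query_spec : Claim_equal_get_msgs_from_latest_query := by
  intro messages _
  unfold Spec_get_msgs_from_latest_query get_msgs_from_latest_query get_msgs_from_latest_query_alt
  rw [pvALoop_eq_findIdx?, pvBCollect_eq]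
  rcases hf : messages.reverse.findIdx? pvP with _ | k
  · rfl
  · have hk : k < messages.length := by
      have := findIdx?_lt_length _ _ _ hf
      simpa using this
    simp only [Option.bind_eq_bind, Option.bind_some, Option.map_some, Option.getD_some, zero_add,
      Option.pure_def]
    have hcast : (messages.length : Int) - 1 - (k : Int) = ((messages.length - 1 - k : Nat) : Int) := by
      push_cast [Nat.sub_sub]; omega
    rw [hcast, PySem.List.slice_from_natCast]
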